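-- pv_equiv track=rewrite | github.com/kevinsu/aoc | 2024/day22/main.py | get_change_map
-- ===== SOURCE A (Python) =====
-- def get_change_map(sequence):
--   change_map = {}
--   for i in range(0, len(sequence)-4):
--     d1 = sequence[i+1]%10-sequence[i]%10
--     d2 = sequence[i+2]%10-sequence[i+1]%10
--     d3 = sequence[i+3]%10-sequence[i+2]%10
--     d4 = sequence[i+4]%10-sequence[i+3]%10
--     if (d1, d2, d3, d4) in change_map:
--        continue
--     change_map[(d1, d2, d3, d4)] = sequence[i+4]%10
--   return change_map
-- ===== SOURCE B (Python) =====
-- def get_change_map(sequence):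
--   m = {}
--   prev = None
--   changes = ()
--   for x in sequence:
--     p = x % 10
--     if prev is not None:
--       if len(changes) == 4:
--         changes = changes[1:]
--       changes = changes + (p - prev,)
--       if len(changes) == 4:
--         m.setdefault(changes, p)
--     prev = p
--   return m
-- ===== Notes on version B (the rewrite author's own statement) =====
-- stated objective: alternative
-- what changed: B is a single streaming pass with a rolling accumulator: it never indexes the list, instead carrying the previous last digit and the last up-to-4 changes as loop state, shifting the window one step per element and recording via setdefault, whereas A is a random-access index loop over range(len-4) that recomputes five %10 values per window and tests membership before insert.
import Mathlib
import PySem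

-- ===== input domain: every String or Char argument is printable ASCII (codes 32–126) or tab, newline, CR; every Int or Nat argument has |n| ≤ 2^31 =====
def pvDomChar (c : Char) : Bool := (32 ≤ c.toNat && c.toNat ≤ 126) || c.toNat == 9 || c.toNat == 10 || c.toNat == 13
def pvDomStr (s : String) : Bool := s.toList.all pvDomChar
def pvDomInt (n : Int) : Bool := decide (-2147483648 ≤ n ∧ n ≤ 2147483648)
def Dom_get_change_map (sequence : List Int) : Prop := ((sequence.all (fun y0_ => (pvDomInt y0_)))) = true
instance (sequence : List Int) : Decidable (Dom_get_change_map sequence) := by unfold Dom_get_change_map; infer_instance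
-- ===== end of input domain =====

-- B replaces A's random-access index loop (recomputing five %10 values per window) by one streaming
-- pass that carries the previous digit and the rolling last-4-changes window as loop state; objective: alternative.

-- ===== PORT A =====
-- literal transliteration of A: index loop over range(0, len-4), inline %10 differences,
-- membership test before insert; dict = PySem.Dict, returned as its items list.
def get_change_map (sequence : List Int) : List (List Int × Int) :=
  (((PySem.List.pyRange 0 ((sequence.length : Int) - 4) 1).foldl (fun change_map i =>
      let d1 := PySem.Int.mod (PySem.List.pyGetD sequence (i+1) 0) 10 - PySem.Int.mod (PySem.List.pyGetD sequence i 0) 10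
      let d2 := PySem.Int.mod (PySem.List.pyGetD sequence (i+2) 0) 10 - PySem.Int.mod (PySem.List.pyGetD sequence (i+1) 0) 10
      let d3 := PySem.Int.mod (PySem.List.pyGetD sequence (i+3) 0) 10 - PySem.Int.mod (PySem.List.pyGetD sequence (i+2) 0) 10
      let d4 := PySem.Int.mod (PySem.List.pyGetD sequence (i+4) 0) 10 - PySem.Int.mod (PySem.List.pyGetD sequence (i+3) 0) 10
      if change_map.contains [d1, d2, d3, d4] then change_map
      else change_map.insert [d1, d2, d3, d4] (PySem.Int.mod (PySem.List.pyGetD sequence (i+4) 0) 10))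
    (PySem.Dict.empty : PySem.Dict (List Int) Int))).items

-- ===== PORT B =====
-- dict.setdefault(k, v): insert only if the key is absent (the returned value is unused in Source B)
def pySetdefault (m : PySem.Dict (List Int) Int) (k : List Int) (v : Int) : PySem.Dict (List Int) Int :=
  if m.contains k then m else m.insert k v

-- transliteration of Source B's loop body: state = (m, prev, changes)
def pvBStep (st : PySem.Dict (List Int) Int × Option Int × List Int) (x : Int) :
    PySem.Dict (List Int) Int × Option Int × List Int :=
  let p := PySem.Int.mod x 10
  match st.2.1 with
  | none => (st.1, some p, st.2.2)
  | some prev =>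
    let c1 := if st.2.2.length == 4 then st.2.2.drop 1 else st.2.2
    let c2 := c1 ++ [p - prev]
    let m2 := if c2.length == 4 then pySetdefault st.1 c2 p else st.1
    (m2, some p, c2)

-- transliteration of Source B: one streaming fold over the sequence with rolling state
def get_change_map_alt (sequence : List Int) : List (List Int × Int) :=
  (sequence.foldl pvBStep ((PySem.Dict.empty : PySem.Dict (List Int) Int), none, [])).1.items

-- ===== PRECONDITION & SPEC =====
def Spec_get_change_map (sequence : List Int) (out : List (List Int × Int)) : Prop := out = get_change_map_alt sequence
instance (sequence : List Int) (out : List (List Int × Int)) : Decidable (Spec_get_change_map sequence out) := by unfold Spec_get_change_map; infer_instance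

-- ===== CLAIM (what is proved, stated in full; the proofs are below) =====
def Claim_equal_get_change_map : Prop := ∀ (sequence : List Int), Dom_get_change_map sequence → Spec_get_change_map sequence (get_change_map sequence)

-- ===== LEMMAS AND PROOFS =====

-- proof-only helpers: price and change of sequence at a (Nat) index, and the window-recording step
def pvPrice (s : List Int) (j : Nat) : Int := PySem.Int.mod (s.getD j 0) 10
def pvChange (s : List Int) (j : Nat) : Int := pvPrice s (j+1) - pvPrice s j
def pvRStep (s : List Int) (m : PySem.Dict (List Int) Int) (k : Nat) : PySem.Dict (List Int) Int :=
  pySetdefault m [pvChange s k, pvChange s (k+1), pvChange s (k+2), pvChange s (k+3)] (pvPrice s (k+4))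

-- the last 4 of the first n changes, explicitly
theorem pvChg4 (s : List Int) (n : Nat) (h : 4 ≤ n) :
    ((List.range n).map (pvChange s)).drop (n-4)
      = [pvChange s (n-4), pvChange s (n-3), pvChange s (n-2), pvChange s (n-1)] := by
  obtain ⟨m, rfl⟩ : ∃ m, n = m + 4 := ⟨n - 4, by omega⟩
  rw [List.range_add, List.map_append]
  rw [show (m + 4 - 4) = ((List.range m).map (pvChange s)).length by simp]
  rw [List.drop_left]
  simp [List.range_succ]

-- invariant of B's streaming fold over the first n elements
theorem pvStream (s : List Int) : ∀ n, n ≤ s.length →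
    (s.take n).foldl pvBStep ((PySem.Dict.empty : PySem.Dict (List Int) Int), none, []) =
      ((List.range (n-4)).foldl (pvRStep s) PySem.Dict.empty,
       (if n = 0 then none else some (pvPrice s (n-1))),
       ((List.range (n-1)).map (pvChange s)).drop (n-5)) := by
  intro n
  induction n with
  | zero => intro _; simp
  | succ n ih =>
    intro hlt
    have hn : n < s.length := by omega
    rw [List.take_add_one, List.getElem?_eq_getElem hn]
    simp only [Option.toList_some, List.foldl_append, List.foldl_cons, List.foldl_nil,
      ih (by omega)]
    have hp : PySem.Int.mod s[n] 10 = pvPrice s n := by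
      simp [pvPrice, List.getD_eq_getElem?_getD, List.getElem?_eq_getElem hn]
    rcases Nat.eq_zero_or_pos n with h0 | hpos
    · subst h0
      simp [pvBStep, pvPrice, List.getD_eq_getElem?_getD, List.getElem?_eq_getElem hn]
    · -- n ≥ 1 : prev = some (price (n-1))
      have hne : ¬ (n = 0) := by omega
      simp only [pvBStep, hne, if_false]
      have hdiff : pvPrice s n - pvPrice s (n-1) = pvChange s (n-1) := by
        simp [pvChange, Nat.sub_add_cancel hpos]
      have hlen : (((List.range (n-1)).map (pvChange s)).drop (n-5)).length = (n-1) - (n-5) := by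
        simp
      -- the shifted window equals drop (n-4) of the first n-1 changes
      have hshift : (if (((List.range (n-1)).map (pvChange s)).drop (n-5)).length == 4
            then (((List.range (n-1)).map (pvChange s)).drop (n-5)).drop 1
            else ((List.range (n-1)).map (pvChange s)).drop (n-5))
          = ((List.range (n-1)).map (pvChange s)).drop (n-4) := by
        by_cases h5 : 5 ≤ n
        · rw [if_pos (by simp [hlen]; omega), List.drop_drop]
          congr 1; omega
        · rw [if_neg (by simp [hlen]; omega)]
          congr 1; omega
      -- the new window is the last 4 (≤ 4) of the first n changes
      have hwin : ((List.range (n-1)).map (pvChange s)).drop (n-4) ++ [pvChange s (n-1)]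
          = ((List.range n).map (pvChange s)).drop (n-4) := by
        conv_rhs => rw [show n = (n-1) + 1 by omega]
        rw [List.range_succ, List.map_append,
          List.drop_append_of_le_length (by simp)]
        simp [Nat.sub_add_cancel hpos]
      have hwinlen : (((List.range n).map (pvChange s)).drop (n-4)).length = n - (n-4) := by
        simp
      simp only [hp, hdiff, hshift, hwin]
      by_cases h4 : 4 ≤ n
      · -- window complete: record at k = n-4
        rw [if_pos (by simp [hwinlen]; omega)]
        have : List.range (n + 1 - 4) = List.range (n-4) ++ [n-4] := by
          rw [show n + 1 - 4 = (n-4) + 1 by omega, List.range_succ]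
        rw [this, List.foldl_append, List.foldl_cons, List.foldl_nil]
        refine congrArg (fun z => (z, _, _)) ?_
        rw [pvRStep, pvChg4 s n h4]
        have e1 : n - 4 + 1 = n - 3 := by omega
        have e2 : n - 4 + 2 = n - 2 := by omega
        have e3 : n - 4 + 3 = n - 1 := by omega
        have e4 : n - 4 + 4 = n := by omega
        rw [e1, e2, e3, e4]
      · -- window still short: dict unchanged
        rw [if_neg (by simp [hwinlen]; omega)]
        simp only [Nat.add_sub_cancel, Nat.succ_ne_zero, if_false,
          show n + 1 - 5 = n - 4 from by omega, show n + 1 - 4 = n - 4 from by omega]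

-- A's index-loop fold equals the fold over the window indices with setdefault
theorem pvFoldEq (s : List Int) :
    (PySem.List.pyRange 0 ((s.length : Int) - 4) 1).foldl (fun change_map i =>
      let d1 := PySem.Int.mod (PySem.List.pyGetD s (i+1) 0) 10 - PySem.Int.mod (PySem.List.pyGetD s i 0) 10
      let d2 := PySem.Int.mod (PySem.List.pyGetD s (i+2) 0) 10 - PySem.Int.mod (PySem.List.pyGetD s (i+1) 0) 10
      let d3 := PySem.Int.mod (PySem.List.pyGetD s (i+3) 0) 10 - PySem.Int.mod (PySem.List.pyGetD s (i+2) 0) 10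
      let d4 := PySem.Int.mod (PySem.List.pyGetD s (i+4) 0) 10 - PySem.Int.mod (PySem.List.pyGetD s (i+3) 0) 10
      if change_map.contains [d1, d2, d3, d4] then change_map
      else change_map.insert [d1, d2, d3, d4] (PySem.Int.mod (PySem.List.pyGetD s (i+4) 0) 10))
      (PySem.Dict.empty : PySem.Dict (List Int) Int)
    = (List.range (s.length - 4)).foldl (pvRStep s) (PySem.Dict.empty : PySem.Dict (List Int) Int) := by
  rw [PySem.List.pyRange_one, List.foldl_map]
  have hn : ((s.length : Int) - 4 - 0).toNat = s.length - 4 := by omega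
  rw [hn]
  congr 1
  funext m k
  have h1 : ∀ j : Nat, PySem.List.pyGetD s ((0:Int) + (k:Int) + (j:Int)) 0 = s.getD (k + j) 0 := by
    intro j
    have : (0:Int) + (k:Int) + (j:Int) = ((k + j : Nat) : Int) := by push_cast; ring
    rw [this, PySem.List.pyGetD_natCast]
  have h0 : PySem.List.pyGetD s ((0:Int) + (k:Int)) 0 = s.getD k 0 := by
    have : (0:Int) + (k:Int) = ((k : Nat) : Int) := by ring
    rw [this, PySem.List.pyGetD_natCast]
  simp only [show ((0:Int) + (k:Int) + 1) = (0:Int) + (k:Int) + ((1:Nat):Int) from by norm_num,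
    show ((0:Int) + (k:Int) + 2) = (0:Int) + (k:Int) + ((2:Nat):Int) from by norm_num,
    show ((0:Int) + (k:Int) + 3) = (0:Int) + (k:Int) + ((3:Nat):Int) from by norm_num,
    show ((0:Int) + (k:Int) + 4) = (0:Int) + (k:Int) + ((4:Nat):Int) from by norm_num,
    h1, h0, pvRStep, pySetdefault, pvChange, pvPrice]

-- ===== VERDICT (by name: the statement is the Claim_ definition above) =====
theorem get_change_map_spec : Claim_equal_get_change_map := by
  intro s _
  unfold Spec_get_change_map get_change_map get_change_map_alt
  rw [show s = s.take s.length by simp, pvStream s s.length (le_refl _)]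
  simp only [List.take_length]
  rw [pvFoldEq s]
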